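-- pv_equiv track=rewrite | github.com/hypham28/intermediate-python-exercises | intermediateex3.py | count_lowercase_letters
-- ===== SOURCE A (Python) =====
-- def count_lowercase_letters(input_string):
--     # Initialize an empty dictionary to store letter counts
--     letter_counts = {}
--
--     # Remove spaces and convert the input string to lowercase
--     cleaned_string = input_string.replace(" ", "").lower()
--
--     # Iterate through the cleaned string
--     for char in cleaned_string:
--         if char.isalpha():  # Check if the character is a letter
--             if char in letter_counts:
--                 letter_counts[char] += 1
--             else:
--                 letter_counts[char] = 1
--
--     return letter_counts
-- ===== SOURCE B (Python) =====
-- def count_lowercase_letters(input_string):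
--     # Alternative: index the distinct characters once, then rescan per key with str.count.
--     cleaned = input_string.replace(" ", "").lower()
--     return {char: cleaned.count(char) for char in dict.fromkeys(cleaned) if char.isalpha()}
-- ===== Notes on version B (the rewrite author's own statement) =====
-- stated objective: faster
-- what changed: A's single accumulating dict-update pass is replaced by building the distinct characters in first-appearance order (dict.fromkeys) and computing each letter's count by a separate str.count rescan of the cleaned string.
import Mathlib
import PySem

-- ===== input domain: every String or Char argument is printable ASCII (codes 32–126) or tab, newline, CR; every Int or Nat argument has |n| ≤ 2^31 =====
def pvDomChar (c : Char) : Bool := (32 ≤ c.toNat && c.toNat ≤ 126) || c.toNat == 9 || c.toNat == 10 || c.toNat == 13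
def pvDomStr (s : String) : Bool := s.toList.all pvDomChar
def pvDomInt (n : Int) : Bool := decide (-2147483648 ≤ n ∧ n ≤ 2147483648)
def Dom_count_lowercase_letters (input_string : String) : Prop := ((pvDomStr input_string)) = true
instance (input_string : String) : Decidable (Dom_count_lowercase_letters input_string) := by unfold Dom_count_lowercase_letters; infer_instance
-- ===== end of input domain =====

-- ===== PORT A =====
-- B differs from A only in how the counts are computed; one honest line: B indexes the
-- distinct characters once and rescans per key instead of A's accumulating dict pass.
def count_lowercase_letters (input_string : String) : List (String × Int) :=
  let cleaned := PySem.Str.lower (PySem.Str.replace input_string " " "")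
  let letter_counts : PySem.Dict String Int :=
    cleaned.toList.foldl (fun d c =>
      if PySem.Chars.isalpha c then
        if d.contains (String.singleton c) then d.modify (String.singleton c) 0 (· + 1)
        else d.insert (String.singleton c) 1
      else d) PySem.Dict.empty
  letter_counts.items

-- ===== PORT B =====
def count_lowercase_letters_alt (input_string : String) : List (String × Int) :=
  let cleaned := PySem.Str.lower (PySem.Str.replace input_string " " "")
  ((PySem.Set.ofList cleaned.toList).filter (fun c => PySem.Chars.isalpha c)).map
    (fun c => (String.singleton c, (PySem.Str.count cleaned (String.singleton c) : Int)))

-- ===== PRECONDITION & SPEC =====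
def Spec_count_lowercase_letters (input_string : String) (out : List (String × Int)) : Prop := out = count_lowercase_letters_alt input_string
instance (input_string : String) (out : List (String × Int)) : Decidable (Spec_count_lowercase_letters input_string out) := by unfold Spec_count_lowercase_letters; infer_instance

-- ===== CLAIM (what is proved, stated in full; the proofs are below) =====
def Claim_equal_count_lowercase_letters : Prop := ∀ (input_string : String), Dom_count_lowercase_letters input_string → Spec_count_lowercase_letters input_string (count_lowercase_letters input_string)

-- ===== LEMMAS AND PROOFS =====

theorem singleton_injective : Function.Injective String.singleton := by
  intro a b h
  simpa using congrArg String.toList h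

theorem step_eq_modify (d : PySem.Dict String Int) (k : String) :
    (if d.contains k then d.modify k 0 (· + 1) else d.insert k 1) = d.modify k 0 (· + 1) := by
  by_cases h : d.contains k = true
  · simp [h]
  · simp only [Bool.not_eq_true] at h
    simp [h, PySem.Dict.modify, PySem.Dict.getD_of_not_contains _ _ h]

theorem count_go_singleton (c : Char) (l : List Char) (acc : Nat) :
    PySem.Chars.count.go [c] l.length l acc = acc + l.count c := by
  induction l generalizing acc with
  | nil => simp [PySem.Chars.count.go]
  | cons h t ih =>
    by_cases hc : h = c
    · subst hc
      simp [PySem.Chars.count.go, List.isPrefixOf, ih]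
      omega
    · simp [PySem.Chars.count.go, List.isPrefixOf, hc, ih, Ne.symm hc]

theorem chars_count_singleton (c : Char) (l : List Char) :
    PySem.Chars.count l [c] = l.count c := by
  simpa using count_go_singleton c l 0

theorem discard_map_inj {α β : Type} [BEq α] [LawfulBEq α] [BEq β] [LawfulBEq β]
    (f : α → β) (hf : Function.Injective f) (s : PySem.Set α) (x : α) :
    (PySem.Set.discard (s.map f) (f x)) = (PySem.Set.discard s x).map f := by
  simp only [PySem.Set.discard, List.filter_map]
  congr 1
  apply List.filter_congr
  intro a _
  simp [Function.comp, hf.eq_iff]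

theorem ofList_map_inj {α β : Type} [BEq α] [LawfulBEq α] [BEq β] [LawfulBEq β]
    (f : α → β) (hf : Function.Injective f) (l : List α) :
    PySem.Set.ofList (l.map f) = (PySem.Set.ofList l).map f := by
  induction l with
  | nil => simp [PySem.Set.ofList_nil]
  | cons x xs ih =>
    simp [PySem.Set.ofList_cons, ih, discard_map_inj f hf]

theorem discard_filter_self {α : Type} [BEq α] [LawfulBEq α]
    (p : α → Bool) (s : PySem.Set α) (x : α) (hp : p x = false) :
    PySem.Set.discard (s.filter p) x = s.filter p := by
  unfold PySem.Set.discard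
  apply List.filter_eq_self.mpr
  intro a ha
  have hpa := List.of_mem_filter ha
  simp only [Bool.not_eq_eq_eq_not, Bool.not_true, beq_eq_false_iff_ne, ne_eq]
  intro h; subst h; simp [hpa] at hp

theorem discard_filter {α : Type} [BEq α] [LawfulBEq α]
    (p : α → Bool) (s : PySem.Set α) (x : α) :
    PySem.Set.discard (s.filter p) x = (PySem.Set.discard s x).filter p := by
  simp [PySem.Set.discard, List.filter_filter]
  congr 1
  funext a
  rw [Bool.and_comm]

theorem ofList_filter {α : Type} [BEq α] [LawfulBEq α] (p : α → Bool) (l : List α) :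
    PySem.Set.ofList (l.filter p) = (PySem.Set.ofList l).filter p := by
  induction l with
  | nil => simp [PySem.Set.ofList_nil]
  | cons x xs ih =>
    by_cases hp : p x
    · simp [PySem.Set.ofList_cons, hp, ih, discard_filter]
    · rw [List.filter_cons_of_neg (by simp [hp]), ih, PySem.Set.ofList_cons,
          List.filter_cons_of_neg (by simp [hp]), ← discard_filter,
          discard_filter_self p _ x (by simpa using hp)]
theorem key_lemma (cleaned : String) :
    (cleaned.toList.foldl (fun d c =>
      if PySem.Chars.isalpha c then
        if d.contains (String.singleton c) then d.modify (String.singleton c) 0 (· + 1)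
        else d.insert (String.singleton c) 1
      else d) PySem.Dict.empty).items
    = ((PySem.Set.ofList cleaned.toList).filter (fun c => PySem.Chars.isalpha c)).map
        (fun c => (String.singleton c, (PySem.Str.count cleaned (String.singleton c) : Int))) := by
  have hstep : cleaned.toList.foldl (fun d c =>
      if PySem.Chars.isalpha c then
        if d.contains (String.singleton c) then d.modify (String.singleton c) 0 (· + 1)
        else d.insert (String.singleton c) 1
      else d) PySem.Dict.empty
    = PySem.Dict.counter ((cleaned.toList.filter (fun c => PySem.Chars.isalpha c)).map String.singleton) := by
    rw [PySem.Dict.counter_eq_foldl, List.foldl_map, List.foldl_filter]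
    apply PySem.List.foldl_congr_mem
    intro d c _
    by_cases ha : PySem.Chars.isalpha c
    · simp [ha, step_eq_modify]
    · simp [ha]
  rw [hstep, PySem.Dict.items_counter,
      ofList_map_inj String.singleton singleton_injective, ofList_filter,
      List.map_map]
  apply List.map_congr_left
  intro c hc
  have hca : PySem.Chars.isalpha c := (List.mem_filter.mp hc).2
  simp only [Function.comp]
  congr 1
  rw [PySem.Str.count_eq]
  have h1 : (String.singleton c).toList = [c] := by simp
  rw [h1, chars_count_singleton]
  rw [List.count_map_of_injective _ _ singleton_injective,
      List.count_filter hca]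

-- ===== VERDICT (by name: the statement is the Claim_ definition above) =====
theorem count_lowercase_letters_spec : Claim_equal_count_lowercase_letters := by
  intro input_string _
  unfold Spec_count_lowercase_letters count_lowercase_letters count_lowercase_letters_alt
  exact key_lemma (PySem.Str.lower (PySem.Str.replace input_string " " ""))
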